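-- pv_equiv track=rewrite | github.com/quantumlib/OpenFermion | src/openfermion/transforms/_bravyi_kitaev_binary.py | occupation_set
-- ===== SOURCE A (Python) =====
-- def occupation_set(index):
--     indices = set()
--     index += 1
--
--     indices.add(index - 1)
--     parent = index & (index - 1)
--     index -= 1
--     while index != parent:
--         indices.add(index - 1)
--         index &= index - 1
--     return indices
-- ===== SOURCE B (Python) =====
-- def occupation_set(index):
--     # Closed form: index ^ (index + 1) == 2**(t+1) - 1 where t is the number of
--     # trailing one-bits of index, so t falls out of one bit_length call and the
--     # set is a single comprehension -- no destructive clear-lowest-bit loop.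
--     t = ((index ^ (index + 1)) // 2).bit_length()
--     return {index} | {index - 2 ** j for j in range(t)}
-- ===== Notes on version B (the rewrite author's own statement) =====
-- stated objective: simpler
-- what changed: A's destructive while-loop (clear lowest set bit until a precomputed parent sentinel is reached, inserting as it goes) is replaced by a closed form: the trailing-ones count t comes from one XOR/bit_length identity (index ^ (index+1) == 2^(t+1)-1) and the result is a single comprehension {index} | {index - 2**j for j in range(t)}.
-- outside the precondition, e.g. on occupation_set(-1): A does not finish within the time limit, B returns {-1, -2}
import Mathlib
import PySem

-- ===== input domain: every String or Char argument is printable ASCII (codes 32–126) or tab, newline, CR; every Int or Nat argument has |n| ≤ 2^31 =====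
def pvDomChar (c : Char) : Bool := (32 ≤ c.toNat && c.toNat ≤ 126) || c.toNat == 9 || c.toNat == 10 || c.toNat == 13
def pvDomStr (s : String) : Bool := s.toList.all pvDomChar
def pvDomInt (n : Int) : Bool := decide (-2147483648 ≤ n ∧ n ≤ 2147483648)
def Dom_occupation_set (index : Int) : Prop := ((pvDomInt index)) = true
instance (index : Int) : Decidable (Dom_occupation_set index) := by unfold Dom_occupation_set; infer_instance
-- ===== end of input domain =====

-- B replaces A's destructive clear-lowest-set-bit while-loop by a closed form
-- (trailing-ones count from index ^ (index+1), then one comprehension); objective: simpler.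

-- ===== PORT A =====
-- the while loop of A, fuel-guarded (fuel 64 is never exhausted on Dom ∧ Pre_, proved below)
def pvOccLoop (parent : Int) : Nat → Int → PySem.Set Int → PySem.Set Int
  | 0, _, indices => indices
  | fuel + 1, index, indices =>
    if index ≠ parent then
      pvOccLoop parent fuel (PySem.Int.band index (index - 1)) (PySem.Set.add indices (index - 1))
    else indices

def occupation_set (index : Int) : List Int :=
  let index1 := index + 1                                          -- index += 1
  let indices := PySem.Set.add PySem.Set.empty (index1 - 1)        -- indices.add(index - 1)
  let parent := PySem.Int.band index1 (index1 - 1)                 -- parent = index & (index - 1)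
  pvOccLoop parent 64 (index1 - 1) indices                         -- index -= 1; while …

-- ===== PORT B =====
def occupation_set_alt (index : Int) : List Int :=
  let t := PySem.Int.bitLength (PySem.Int.floordiv (PySem.Int.bxor index (index + 1)) 2)
  PySem.Set.union (PySem.Set.ofList [index])
    ((PySem.List.pyRange 0 (t : Int) 1).map (fun j => index - 2 ^ j.toNat))

-- ===== PRECONDITION & SPEC =====
-- A's while-loop never terminates on index = -1 (every bit of -1 is set, so index never
-- reaches parent); Pre_ excludes exactly that single input, on which A returns nothing.
def Pre_occupation_set (index : Int) : Prop := index ≠ -1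
instance (index : Int) : Decidable (Pre_occupation_set index) := by unfold Pre_occupation_set; infer_instance
def pvWitness_occupation_set : Int := 3

def Spec_occupation_set (index : Int) (out : List Int) : Prop := out = occupation_set_alt index
instance (index : Int) (out : List Int) : Decidable (Spec_occupation_set index out) := by unfold Spec_occupation_set; infer_instance

-- ===== CLAIM =====
def Claim_equal_occupation_set : Prop := ∀ (index : Int), Dom_occupation_set index → Pre_occupation_set index → Spec_occupation_set index (occupation_set index)

-- ===== LEMMAS AND PROOFS =====

theorem pvTestBit_mulPow_add (M a n i : ℕ) (h : a < 2 ^ n) :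
    (M * 2 ^ n + a).testBit i = if i < n then a.testBit i else M.testBit (i - n) := by
  rcases lt_or_ge i n with hi | hi
  · have e : M * 2 ^ n + a = a + (M * 2 ^ (n - i)) * 2 ^ i := by
      rw [mul_assoc, ← pow_add, show n - i + i = n by omega]
      ring
    rw [if_pos hi, Nat.testBit_eq_decide_div_mod_eq, Nat.testBit_eq_decide_div_mod_eq, e,
      Nat.add_mul_div_right _ _ (Nat.two_pow_pos _)]
    have e2 : M * 2 ^ (n - i) = M * 2 ^ (n - i - 1) * 2 := by
      rw [mul_assoc, ← pow_succ, show n - i - 1 + 1 = n - i by omega]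
    rw [e2, Nat.add_mul_mod_self_right]
  · have e : (2:ℕ) ^ i = 2 ^ n * 2 ^ (i - n) := by rw [← pow_add]; congr 1; omega
    rw [if_neg (by omega), Nat.testBit_eq_decide_div_mod_eq, Nat.testBit_eq_decide_div_mod_eq, e,
      ← Nat.div_div_eq_div_mul, show M * 2 ^ n + a = a + M * 2 ^ n by ring,
      Nat.add_mul_div_right _ _ (Nat.two_pow_pos _), Nat.div_eq_of_lt h, Nat.zero_add]

theorem pvBlock_land (M a b n : ℕ) (ha : a < 2 ^ n) (hb : b < 2 ^ n) :
    (M * 2 ^ n + a) &&& (M * 2 ^ n + b) = M * 2 ^ n + (a &&& b) := by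
  have hab : a &&& b < 2 ^ n := Nat.and_lt_two_pow _ hb
  apply Nat.eq_of_testBit_eq
  intro i
  rw [Nat.testBit_land, pvTestBit_mulPow_add M a n i ha, pvTestBit_mulPow_add M b n i hb,
    pvTestBit_mulPow_add M (a &&& b) n i hab]
  split_ifs with hcase
  · rw [Nat.testBit_land]
  · exact Bool.and_self _

theorem pvBlock_lor (M a b n : ℕ) (ha : a < 2 ^ n) (hb : b < 2 ^ n) :
    (M * 2 ^ n + a) ||| (M * 2 ^ n + b) = M * 2 ^ n + (a ||| b) := by
  have hab : a ||| b < 2 ^ n := Nat.or_lt_two_pow ha hb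
  apply Nat.eq_of_testBit_eq
  intro i
  rw [Nat.testBit_lor, pvTestBit_mulPow_add M a n i ha, pvTestBit_mulPow_add M b n i hb,
    pvTestBit_mulPow_add M (a ||| b) n i hab]
  split_ifs with hcase
  · rw [Nat.testBit_lor]
  · exact Bool.or_self _

theorem pvBlock_xor (M a b n : ℕ) (ha : a < 2 ^ n) (hb : b < 2 ^ n) :
    (M * 2 ^ n + a) ^^^ (M * 2 ^ n + b) = a ^^^ b := by
  have hab : a ^^^ b < 2 ^ n := Nat.xor_lt_two_pow ha hb
  apply Nat.eq_of_testBit_eq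
  intro i
  rw [Nat.testBit_xor, pvTestBit_mulPow_add M a n i ha, pvTestBit_mulPow_add M b n i hb]
  split_ifs with hcase
  · rw [Nat.testBit_xor]
  · rw [Bool.xor_self, Nat.testBit_eq_false_of_lt (lt_of_lt_of_le hab (Nat.pow_le_pow_right (by norm_num) (by omega)))]

theorem pvCompl_lor (a b n : ℕ) (ha : a < 2 ^ n) (hb : b < 2 ^ n) :
    (2 ^ n - (a + 1)) ||| (2 ^ n - (b + 1)) = 2 ^ n - ((a &&& b) + 1) := by
  have hab : a &&& b < 2 ^ n := Nat.and_lt_two_pow _ hb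
  apply Nat.eq_of_testBit_eq
  intro i
  rw [Nat.testBit_lor, Nat.testBit_two_pow_sub_succ ha, Nat.testBit_two_pow_sub_succ hb,
    Nat.testBit_two_pow_sub_succ hab, Nat.testBit_land]
  cases a.testBit i <;> cases b.testBit i <;> cases (decide (i < n)) <;> rfl

theorem pvCompl_xor (a b n : ℕ) (ha : a < 2 ^ n) (hb : b < 2 ^ n) :
    (2 ^ n - (a + 1)) ^^^ (2 ^ n - (b + 1)) = a ^^^ b := by
  have hab : a ^^^ b < 2 ^ n := Nat.xor_lt_two_pow ha hb
  apply Nat.eq_of_testBit_eq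
  intro i
  rw [Nat.testBit_xor, Nat.testBit_two_pow_sub_succ ha, Nat.testBit_two_pow_sub_succ hb]
  rcases lt_or_ge i n with hi | hi
  · simp [hi, Nat.testBit_xor]
  · have h1 : a.testBit i = false := Nat.testBit_eq_false_of_lt (lt_of_lt_of_le ha (Nat.pow_le_pow_right (by norm_num) hi))
    have h2 : b.testBit i = false := Nat.testBit_eq_false_of_lt (lt_of_lt_of_le hb (Nat.pow_le_pow_right (by norm_num) hi))
    have h3 : (a ^^^ b).testBit i = false := Nat.testBit_eq_false_of_lt (lt_of_lt_of_le hab (Nat.pow_le_pow_right (by norm_num) hi))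
    simp [h1, h2, h3, show ¬ i < n by omega]

theorem pvPow_and_pred (t : ℕ) : 2 ^ t &&& (2 ^ t - 1) = 0 := by
  apply Nat.eq_of_testBit_eq
  intro i
  rw [Nat.testBit_land, Nat.testBit_two_pow, Nat.testBit_two_pow_sub_one, Nat.zero_testBit]
  by_cases h : t = i <;> simp [h]

theorem pvSub_and (t k : ℕ) (h : k < t) :
    (2 ^ t - 2 ^ k) &&& (2 ^ t - 2 ^ k - 1) = 2 ^ t - 2 ^ (k + 1) := by
  have hk1 : (1:ℕ) ≤ 2 ^ k := Nat.one_le_two_pow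
  have hk1' : (1:ℕ) ≤ 2 ^ (k + 1) := Nat.one_le_two_pow
  have h2 : 2 ^ k < 2 ^ t := Nat.pow_lt_pow_right (by norm_num) h
  have h1 : 2 ^ k - 1 < 2 ^ t := by omega
  have h3 : 2 ^ (k + 1) - 1 < 2 ^ t := by
    have h4 : 2 ^ (k + 1) ≤ 2 ^ t := Nat.pow_le_pow_right (by norm_num) (by omega)
    omega
  rw [show 2 ^ t - 2 ^ k = 2 ^ t - ((2 ^ k - 1) + 1) by omega,
    show 2 ^ t - ((2 ^ k - 1) + 1) - 1 = 2 ^ t - (2 ^ k + 1) by omega,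
    show 2 ^ t - 2 ^ (k + 1) = 2 ^ t - ((2 ^ (k + 1) - 1) + 1) by omega]
  apply Nat.eq_of_testBit_eq
  intro i
  rw [Nat.testBit_land, Nat.testBit_two_pow_sub_succ h1, Nat.testBit_two_pow_sub_succ h2,
    Nat.testBit_two_pow_sub_succ h3, Nat.testBit_two_pow_sub_one, Nat.testBit_two_pow,
    Nat.testBit_two_pow_sub_one]
  by_cases c1 : i < t <;> by_cases c2 : i < k <;> by_cases c3 : k = i <;>
    by_cases c4 : i < k + 1 <;> simp [c1, c2, c3, c4] <;> omega

theorem pvPred_xor_pow (t : ℕ) : (2 ^ t - 1) ^^^ 2 ^ t = 2 ^ (t + 1) - 1 := by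
  apply Nat.eq_of_testBit_eq
  intro i
  rw [Nat.testBit_xor, Nat.testBit_two_pow_sub_one, Nat.testBit_two_pow, Nat.testBit_two_pow_sub_one]
  by_cases c1 : i < t <;> by_cases c2 : t = i <;> by_cases c3 : i < t + 1 <;> simp [c1, c2, c3] <;> omega

theorem pvIntBand_block (m : ℤ) (n a b : ℕ) (ha : a < 2 ^ n) (hb : b < 2 ^ n) :
    PySem.Int.band (m * 2 ^ n + a) (m * 2 ^ n + b) = m * 2 ^ n + ((a &&& b : ℕ) : ℤ) := by
  have hPn : ((2 ^ n : ℕ) : ℤ) = 2 ^ n := by push_cast; ring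
  have haZ : (a : ℤ) < 2 ^ n := by rw [← hPn]; exact_mod_cast ha
  have hbZ : (b : ℤ) < 2 ^ n := by rw [← hPn]; exact_mod_cast hb
  have hP : (0:ℤ) < 2 ^ n := by positivity
  rcases le_or_gt (0:ℤ) m with hm | hm
  · have hA : 0 ≤ m * 2 ^ n + a := by positivity
    have hB : 0 ≤ m * 2 ^ n + b := by positivity
    rw [PySem.Int.band_of_nonneg hA hB]
    have hMcast : ((m.toNat : ℤ)) = m := Int.toNat_of_nonneg hm
    have eA : m * 2 ^ n + (a : ℤ) = ((m.toNat * 2 ^ n + a : ℕ) : ℤ) := by push_cast [hMcast]; ring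
    have eB : m * 2 ^ n + (b : ℤ) = ((m.toNat * 2 ^ n + b : ℕ) : ℤ) := by push_cast [hMcast]; ring
    rw [eA, eB, Int.toNat_natCast, Int.toNat_natCast, pvBlock_land _ _ _ _ ha hb]
    push_cast [hMcast]
    ring
  · have hm1 : m ≤ -1 := by omega
    have hmul : m * 2 ^ n ≤ -1 * 2 ^ n := mul_le_mul_of_nonneg_right hm1 (le_of_lt hP)
    have hA : m * 2 ^ n + a < 0 := by linarith
    have hB : m * 2 ^ n + b < 0 := by linarith
    rw [show PySem.Int.band (m * 2 ^ n + ↑a) (m * 2 ^ n + ↑b)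
        = -(((-(m * 2 ^ n + a) - 1).toNat ||| (-(m * 2 ^ n + b) - 1).toNat : ℕ) : ℤ) - 1 by
      simp [PySem.Int.band, not_le.mpr hA, not_le.mpr hB]]
    have hM' : (((-m - 1).toNat : ℤ)) = -m - 1 := Int.toNat_of_nonneg (by omega)
    have eA : -(m * 2 ^ n + a) - 1 = (((-m - 1).toNat * 2 ^ n + (2 ^ n - (a + 1)) : ℕ) : ℤ) := by
      push_cast [hM', Nat.cast_sub (show a + 1 ≤ 2 ^ n by omega)]
      ring
    have eB : -(m * 2 ^ n + b) - 1 = (((-m - 1).toNat * 2 ^ n + (2 ^ n - (b + 1)) : ℕ) : ℤ) := by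
      push_cast [hM', Nat.cast_sub (show b + 1 ≤ 2 ^ n by omega)]
      ring
    have hsa : 2 ^ n - (a + 1) < 2 ^ n := by have := Nat.two_pow_pos n; omega
    have hsb : 2 ^ n - (b + 1) < 2 ^ n := by have := Nat.two_pow_pos n; omega
    rw [eA, eB, Int.toNat_natCast, Int.toNat_natCast, pvBlock_lor _ _ _ _ hsa hsb,
      pvCompl_lor a b n ha hb]
    have hab : a &&& b < 2 ^ n := Nat.and_lt_two_pow _ hb
    push_cast [hM', Nat.cast_sub (show (a &&& b) + 1 ≤ 2 ^ n by omega)]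
    ring

theorem pvIntBxor_block (m : ℤ) (n a b : ℕ) (ha : a < 2 ^ n) (hb : b < 2 ^ n) :
    PySem.Int.bxor (m * 2 ^ n + a) (m * 2 ^ n + b) = ((a ^^^ b : ℕ) : ℤ) := by
  have hPn : ((2 ^ n : ℕ) : ℤ) = 2 ^ n := by push_cast; ring
  have haZ : (a : ℤ) < 2 ^ n := by rw [← hPn]; exact_mod_cast ha
  have hbZ : (b : ℤ) < 2 ^ n := by rw [← hPn]; exact_mod_cast hb
  have hP : (0:ℤ) < 2 ^ n := by positivity
  rcases le_or_gt (0:ℤ) m with hm | hm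
  · have hA : 0 ≤ m * 2 ^ n + a := by positivity
    have hB : 0 ≤ m * 2 ^ n + b := by positivity
    rw [PySem.Int.bxor_of_nonneg hA hB]
    have hMcast : ((m.toNat : ℤ)) = m := Int.toNat_of_nonneg hm
    have eA : m * 2 ^ n + (a : ℤ) = ((m.toNat * 2 ^ n + a : ℕ) : ℤ) := by push_cast [hMcast]; ring
    have eB : m * 2 ^ n + (b : ℤ) = ((m.toNat * 2 ^ n + b : ℕ) : ℤ) := by push_cast [hMcast]; ring
    rw [eA, eB, Int.toNat_natCast, Int.toNat_natCast, pvBlock_xor _ _ _ _ ha hb]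
  · have hm1 : m ≤ -1 := by omega
    have hmul : m * 2 ^ n ≤ -1 * 2 ^ n := mul_le_mul_of_nonneg_right hm1 (le_of_lt hP)
    have hA : m * 2 ^ n + a < 0 := by linarith
    have hB : m * 2 ^ n + b < 0 := by linarith
    rw [show PySem.Int.bxor (m * 2 ^ n + ↑a) (m * 2 ^ n + ↑b)
        = (((-(m * 2 ^ n + a) - 1).toNat ^^^ (-(m * 2 ^ n + b) - 1).toNat : ℕ) : ℤ) by
      simp [PySem.Int.bxor, not_le.mpr hA, not_le.mpr hB]]
    have hM' : (((-m - 1).toNat : ℤ)) = -m - 1 := Int.toNat_of_nonneg (by omega)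
    have eA : -(m * 2 ^ n + a) - 1 = (((-m - 1).toNat * 2 ^ n + (2 ^ n - (a + 1)) : ℕ) : ℤ) := by
      push_cast [hM', Nat.cast_sub (show a + 1 ≤ 2 ^ n by omega)]
      ring
    have eB : -(m * 2 ^ n + b) - 1 = (((-m - 1).toNat * 2 ^ n + (2 ^ n - (b + 1)) : ℕ) : ℤ) := by
      push_cast [hM', Nat.cast_sub (show b + 1 ≤ 2 ^ n by omega)]
      ring
    have hsa : 2 ^ n - (a + 1) < 2 ^ n := by have := Nat.two_pow_pos n; omega
    have hsb : 2 ^ n - (b + 1) < 2 ^ n := by have := Nat.two_pow_pos n; omega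
    rw [eA, eB, Int.toNat_natCast, Int.toNat_natCast, pvBlock_xor _ _ _ _ hsa hsb,
      pvCompl_xor a b n ha hb]

theorem pvOccLoop_spec (m : ℤ) (t : ℕ) : ∀ (fuel k : ℕ) (s : PySem.Set Int),
    k ≤ t → t - k < fuel →
    (∀ x ∈ s, m * 2 ^ (t + 1) + ((2 ^ t - 2 ^ k : ℕ) : ℤ) - 1 < x) →
    pvOccLoop (m * 2 ^ (t + 1)) fuel (m * 2 ^ (t + 1) + ((2 ^ t - 2 ^ k : ℕ) : ℤ)) s
      = s ++ (List.range (t - k)).map (fun i => m * 2 ^ (t + 1) + ((2 ^ t - 2 ^ (k + i) : ℕ) : ℤ) - 1) := by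
  intro fuel
  induction fuel with
  | zero => intro k s hk hf hs; omega
  | succ fuel ih =>
    intro k s hk hf hs
    rcases eq_or_lt_of_le hk with rfl | hkt
    · rw [pvOccLoop, if_neg (by simp)]
      simp
    · -- k < t
      have hppos : (1:ℕ) ≤ 2 ^ k := Nat.one_le_two_pow
      have hptk : 2 ^ k < 2 ^ t := Nat.pow_lt_pow_right (by norm_num) hkt
      have hsk1 : 2 ^ (k + 1) ≤ 2 ^ t := Nat.pow_le_pow_right (by norm_num) (by omega)
      have hne : m * 2 ^ (t + 1) + ((2 ^ t - 2 ^ k : ℕ) : ℤ) ≠ m * 2 ^ (t + 1) := by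
        have : (0:ℤ) < ((2 ^ t - 2 ^ k : ℕ) : ℤ) := by exact_mod_cast Nat.sub_pos_of_lt hptk
        omega
      rw [pvOccLoop, if_pos hne]
      -- the inserted element is fresh
      have hfresh : m * 2 ^ (t + 1) + ((2 ^ t - 2 ^ k : ℕ) : ℤ) - 1 ∉ s := fun hmem =>
        lt_irrefl _ (hs _ hmem)
      have hub : 2 ^ t < 2 ^ (t + 1) := Nat.pow_lt_pow_right (by norm_num) (by omega)
      have ecast : m * 2 ^ (t + 1) + ((2 ^ t - 2 ^ k : ℕ) : ℤ) - 1
          = m * 2 ^ (t + 1) + ((2 ^ t - 2 ^ k - 1 : ℕ) : ℤ) := by omega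
      have eband : PySem.Int.band (m * 2 ^ (t + 1) + ((2 ^ t - 2 ^ k : ℕ) : ℤ))
          (m * 2 ^ (t + 1) + ((2 ^ t - 2 ^ k : ℕ) : ℤ) - 1)
          = m * 2 ^ (t + 1) + ((2 ^ t - 2 ^ (k + 1) : ℕ) : ℤ) := by
        rw [ecast, pvIntBand_block m (t + 1) _ _ (by omega) (by omega), pvSub_and t k hkt]
      rw [PySem.Set.add_of_not_mem hfresh, eband,
        ih (k + 1) (s ++ [m * 2 ^ (t + 1) + ((2 ^ t - 2 ^ k : ℕ) : ℤ) - 1]) (by omega) (by omega) ?inv]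
      case inv =>
        intro x hx
        rcases List.mem_append.mp hx with hx | hx
        · have := hs x hx
          omega
        · simp only [List.mem_singleton] at hx
          subst hx
          omega
      rw [List.append_assoc]
      congr 1
      rw [show t - k = (t - (k + 1)) + 1 by omega, List.range_succ_eq_map, List.map_cons,
        List.map_map, Nat.add_zero, List.singleton_append]
      congr 1
      apply List.map_congr_left
      intro i _
      simp only [Function.comp_apply, Nat.succ_eq_add_one]
      rw [show k + (i + 1) = k + 1 + i from by omega]

theorem pvA_val (index m : ℤ) (t : ℕ) (ht : t < 64)
    (h : index = m * 2 ^ (t + 1) + ((2 ^ t - 1 : ℕ) : ℤ)) :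
    occupation_set index = index :: (List.range t).map (fun k => index - 2 ^ k) := by
  have h1t : (1:ℕ) ≤ 2 ^ t := Nat.one_le_two_pow
  have hub : 2 ^ t < 2 ^ (t + 1) := Nat.pow_lt_pow_right (by norm_num) (by omega)
  have hc : ((2 ^ t - 1 : ℕ) : ℤ) + 1 = ((2 ^ t : ℕ) : ℤ) := by omega
  have e1 : index + 1 = m * 2 ^ (t + 1) + ((2 ^ t : ℕ) : ℤ) := by
    rw [h, add_assoc, hc]
  simp only [occupation_set]
  rw [add_sub_cancel_right]
  rw [show PySem.Set.add PySem.Set.empty index = [index] from PySem.Set.add_of_not_mem (List.not_mem_nil)]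
  have eparent : PySem.Int.band (index + 1) index
      = m * 2 ^ (t + 1) := by
    rw [e1]
    conv_lhs => rw [h]
    rw [pvIntBand_block m (t + 1) _ _ hub (by omega), pvPow_and_pred t]
    simp
  rw [eparent]
  have e0 : index = m * 2 ^ (t + 1) + ((2 ^ t - 2 ^ 0 : ℕ) : ℤ) := by
    rw [h]; norm_num
  have hloop := pvOccLoop_spec m t 64 0 [index] (by omega) (by omega) ?inv
  case inv =>
    intro x hx
    simp only [List.mem_singleton] at hx
    subst hx
    rw [h]
    simp only [pow_zero]
    omega
  rw [← e0] at hloop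
  rw [hloop, Nat.sub_zero, List.singleton_append]
  congr 1
  apply List.map_congr_left
  intro i hi
  have hi' : i < t := List.mem_range.mp hi
  have hle : 2 ^ i < 2 ^ t := Nat.pow_lt_pow_right (by norm_num) hi'
  have h1i : (1:ℕ) ≤ 2 ^ i := Nat.one_le_two_pow
  rw [Nat.zero_add, h]
  push_cast [Nat.cast_sub (le_of_lt hle), Nat.cast_sub h1t]
  ring

theorem pvOddFactor : ∀ (z : ℤ), z ≠ 0 →
    ∃ t : ℕ, ∃ u : ℤ, u % 2 = 1 ∧ z = 2 ^ t * u ∧ 2 ^ t ≤ z.natAbs := by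
  suffices H : ∀ (n : ℕ) (z : ℤ), z.natAbs = n → z ≠ 0 →
      ∃ t : ℕ, ∃ u : ℤ, u % 2 = 1 ∧ z = 2 ^ t * u ∧ 2 ^ t ≤ z.natAbs by
    exact fun z hz => H z.natAbs z rfl hz
  intro n
  induction n using Nat.strong_induction_on with
  | _ n ih =>
    intro z hzn hz
    rcases Int.even_or_odd z with he | ho
    · obtain ⟨w, hw⟩ := he
      have hw2 : z = 2 * w := by omega
      have hwne : w ≠ 0 := by omega
      have hlt : w.natAbs < n := by
        subst hzn
        rw [hw2, Int.natAbs_mul]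
        rw [show ((2:ℤ)).natAbs = 2 from rfl]
        omega
      obtain ⟨t, u, hu, hzu, hb⟩ := ih w.natAbs hlt w rfl hwne
      refine ⟨t + 1, u, hu, ?_, ?_⟩
      · rw [hw2, hzu]; ring
      · rw [hw2, Int.natAbs_mul]
        rw [show ((2:ℤ)).natAbs = 2 from rfl]
        calc 2 ^ (t + 1) = 2 * 2 ^ t := by ring
        _ ≤ 2 * w.natAbs := by omega
    · refine ⟨0, z, ?_, by ring, by rw [pow_zero]; exact Int.natAbs_pos.mpr hz⟩
      rcases ho with ⟨w, hw⟩
      omega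

theorem pvB_val (index m : ℤ) (t : ℕ)
    (h : index = m * 2 ^ (t + 1) + ((2 ^ t - 1 : ℕ) : ℤ)) :
    occupation_set_alt index = index :: (List.range t).map (fun k => index - 2 ^ k) := by
  have h1t : (1:ℕ) ≤ 2 ^ t := Nat.one_le_two_pow
  have hub : 2 ^ t < 2 ^ (t + 1) := Nat.pow_lt_pow_right (by norm_num) (by omega)
  have hc : ((2 ^ t - 1 : ℕ) : ℤ) + 1 = ((2 ^ t : ℕ) : ℤ) := by omega
  have e1 : index + 1 = m * 2 ^ (t + 1) + ((2 ^ t : ℕ) : ℤ) := by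
    rw [h, add_assoc, hc]
  have h1t1 : (1:ℕ) ≤ 2 ^ (t + 1) := Nat.one_le_two_pow
  have hbx : PySem.Int.bxor index (index + 1) = ((2 ^ (t + 1) - 1 : ℕ) : ℤ) := by
    rw [show PySem.Int.bxor index (index + 1)
        = PySem.Int.bxor (m * 2 ^ (t + 1) + ((2 ^ t - 1 : ℕ) : ℤ)) (m * 2 ^ (t + 1) + ((2 ^ t : ℕ) : ℤ)) from by
      rw [← h, ← e1]]
    rw [pvIntBxor_block m (t + 1) _ _ (by omega) hub, pvPred_xor_pow t]
  have hdiv : PySem.Int.floordiv ((2 ^ (t + 1) - 1 : ℕ) : ℤ) 2 = ((2 ^ t - 1 : ℕ) : ℤ) := by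
    have := PySem.Int.floordiv_natCast (2 ^ (t + 1) - 1) 2
    have h2 : ((2:ℕ) : ℤ) = (2:ℤ) := by norm_num
    rw [h2] at this
    rw [this]
    congr 1
    have : 2 ^ (t + 1) = 2 ^ t * 2 := by ring
    omega
  have hbl : PySem.Int.bitLength ((2 ^ t - 1 : ℕ) : ℤ) = t := by
    rcases Nat.eq_zero_or_pos t with rfl | htpos
    · simp [PySem.Int.bitLength_zero]
    · have h2t : (2:ℕ) ≤ 2 ^ t := by
        calc (2:ℕ) = 2 ^ 1 := by norm_num
        _ ≤ 2 ^ t := Nat.pow_le_pow_right (by norm_num) htpos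
      have hne : ((2 ^ t - 1 : ℕ) : ℤ) ≠ 0 := by
        rw [Nat.cast_ne_zero]
        omega
      have habs : ((2 ^ t - 1 : ℕ) : ℤ).natAbs = 2 ^ t - 1 := Int.natAbs_natCast _
      have h1 := PySem.Int.lt_two_pow_bitLength ((2 ^ t - 1 : ℕ) : ℤ)
      have h2 := PySem.Int.two_pow_bitLength_le ((2 ^ t - 1 : ℕ) : ℤ) hne
      rw [habs] at h1 h2
      set L := PySem.Int.bitLength ((2 ^ t - 1 : ℕ) : ℤ) with hL
      have htL : t ≤ L := by
        rw [← Nat.pow_le_pow_iff_right (by norm_num : 1 < 2)]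
        omega
      have hLt : L - 1 < t := by
        rw [← Nat.pow_lt_pow_iff_right (by norm_num : 1 < 2)]
        omega
      omega
  simp only [occupation_set_alt, hbx, hdiv, hbl]
  rw [PySem.List.pyRange_one]
  have hrl : (((t:ℤ) - 0).toNat) = t := by omega
  rw [hrl, List.map_map]
  have hmap : (List.range t).map ((fun j : ℤ => index - 2 ^ j.toNat) ∘ (fun k : ℕ => (0:ℤ) + k))
      = (List.range t).map (fun k : ℕ => index - 2 ^ k) := by
    apply List.map_congr_left
    intro i _
    simp
  rw [hmap]
  have hnodup : ((List.range t).map (fun k : ℕ => index - 2 ^ k)).Nodup := by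
    refine List.Nodup.map ?_ List.nodup_range
    intro x y hxy
    simp only at hxy
    have hpow : (2:ℤ) ^ x = 2 ^ y := by omega
    have hcx : ((2 ^ x : ℕ) : ℤ) = ((2 ^ y : ℕ) : ℤ) := by push_cast; exact hpow
    exact Nat.pow_right_injective (le_refl 2) (Nat.cast_inj.mp hcx)
  have hdisj : ∀ x ∈ (List.range t).map (fun k : ℕ => index - 2 ^ k),
      x ∉ PySem.Set.ofList [index] := by
    intro x hx
    obtain ⟨k, _, rfl⟩ := List.mem_map.mp hx
    have hpos : (0:ℤ) < 2 ^ k := by positivity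
    rw [show PySem.Set.ofList [index] = [index] from PySem.Set.ofList_eq_self_of_nodup [index] (List.nodup_singleton index)]
    simp only [List.mem_singleton]
    omega
  show PySem.Set.union (PySem.Set.ofList [index]) _ = _
  rw [PySem.Set.union, PySem.Set.update_eq_append_of_disjoint _ _ hnodup hdisj,
    PySem.Set.ofList_eq_self_of_nodup [index] (List.nodup_singleton index), List.singleton_append]

theorem pvMain (index : ℤ) (hdom : -2147483648 ≤ index ∧ index ≤ 2147483648) (hpre : index ≠ -1) :
    occupation_set index = occupation_set_alt index := by
  have hz : index + 1 ≠ 0 := by omega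
  obtain ⟨t, u, hu, hzu, hb⟩ := pvOddFactor (index + 1) hz
  obtain ⟨mm, hm⟩ : ∃ m : ℤ, u = 2 * m + 1 := ⟨(u - 1) / 2, by omega⟩
  have h1t : (1:ℕ) ≤ 2 ^ t := Nat.one_le_two_pow
  have h : index = mm * 2 ^ (t + 1) + ((2 ^ t - 1 : ℕ) : ℤ) := by
    push_cast [Nat.cast_sub h1t]
    subst hm
    linear_combination hzu
  have habs : (index + 1).natAbs ≤ 2147483649 := by omega
  have ht : t < 64 := by
    by_contra hcon
    have h64 : 2 ^ 64 ≤ 2 ^ t := Nat.pow_le_pow_right (by norm_num) (by omega)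
    have : (2:ℕ) ^ 64 ≤ 2147483649 := by omega
    norm_num at this
  rw [pvA_val index mm t ht h, pvB_val index mm t h]

-- ===== VERDICT =====
theorem occupation_set_spec : Claim_equal_occupation_set := by
  intro index hdom hpre
  unfold Spec_occupation_set
  simp only [Dom_occupation_set, pvDomInt, decide_eq_true_eq] at hdom
  exact pvMain index hdom hpre
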